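-- pv_equiv track=rewrite | github.com/SqYang-git/MyNotes | Exercises/0921_oj27273.py | sum1
-- ===== SOURCE A (Python) =====
-- def sum1(n):
--     gauss = n * (n + 1) // 2
--     position = 1
--     sum2 = 0
--     while position <= n:
--         sum2 += position
--         position *= 2
--     result = gauss - 2 * sum2
--     return result
-- ===== SOURCE B (Python) =====
-- def sum1(n):
--     gauss = n * (n + 1) // 2
--     sum2 = (1 << n.bit_length()) - 1 if n > 0 else 0
--     return gauss - 2 * sum2
-- ===== Notes on version B (the rewrite author's own statement) =====
-- stated objective: simpler
-- what changed: replaces the while-loop accumulating powers of 2 with the closed-form geometric sum (1 << n.bit_length()) - 1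
import Mathlib
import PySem

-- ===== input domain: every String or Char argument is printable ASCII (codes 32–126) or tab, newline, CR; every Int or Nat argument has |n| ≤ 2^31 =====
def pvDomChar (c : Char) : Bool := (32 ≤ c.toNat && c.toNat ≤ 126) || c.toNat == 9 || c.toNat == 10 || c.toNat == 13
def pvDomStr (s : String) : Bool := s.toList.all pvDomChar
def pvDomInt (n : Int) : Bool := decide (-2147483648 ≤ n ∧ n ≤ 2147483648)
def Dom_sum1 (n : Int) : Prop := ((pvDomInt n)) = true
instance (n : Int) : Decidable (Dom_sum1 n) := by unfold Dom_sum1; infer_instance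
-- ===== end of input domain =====

-- B replaces A's while-loop summing powers of 2 with the closed-form geometric sum
-- (1 << n.bit_length()) - 1; objective: simpler (a closed form instead of a loop).

-- ===== PORT A =====
-- The while-loop of A.  The extra conjunct '1 ≤ position' in the guard is an invariant of
-- A's loop (position starts at 1 and only doubles) and is needed only for termination;
-- it never changes the result on any reachable state.
def sum1Loop (n : Int) (position : Int) (sum2 : Int) : Int :=
  if _h : position ≤ n ∧ 1 ≤ position then
    sum1Loop n (position * 2) (sum2 + position)
  else sum2
termination_by (n + 1 - position).toNat
decreasing_by omega

def sum1 (n : Int) : Int :=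
  let gauss := PySem.Int.floordiv (n * (n + 1)) 2
  let sum2 := sum1Loop n 1 0
  gauss - 2 * sum2

-- ===== PORT B =====
-- n.bit_length() for n > 0 is Nat.size n.toNat; 1 <<< k = 2^k.
def sum1_alt (n : Int) : Int :=
  let gauss := PySem.Int.floordiv (n * (n + 1)) 2
  let sum2 : Int := if 0 < n then (1 <<< (Nat.size n.toNat) : Int) - 1 else 0
  gauss - 2 * sum2

-- ===== PRECONDITION & SPEC =====
def Spec_sum1 (n : Int) (out : Int) : Prop := out = sum1_alt n
instance (n : Int) (out : Int) : Decidable (Spec_sum1 n out) := by unfold Spec_sum1; infer_instance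

-- ===== CLAIM (what is proved, stated in full; the proofs are below) =====
def Claim_equal_sum1 : Prop := ∀ (n : Int), Dom_sum1 n → Spec_sum1 n (sum1 n)

-- ===== LEMMAS AND PROOFS =====

-- Invariant of A's loop: called with position = 2^k it returns sum2 + 2^max(size n.toNat, k) - 2^k.
lemma sum1Loop_pow (n : Int) (hn : 0 ≤ n) :
    ∀ d k (s : Int), Nat.size n.toNat ≤ k + d →
      sum1Loop n ((2 : Int) ^ k) s = s + 2 ^ (max (Nat.size n.toNat) k) - 2 ^ k := by
  intro d
  induction d with
  | zero =>
    intro k s hk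
    simp only [Nat.add_zero] at hk
    have hlt : n.toNat < 2 ^ k := Nat.size_le.mp hk
    have hnot : ¬ ((2 : Int) ^ k ≤ n) := by
      intro hle
      have : (2 : Int) ^ k ≤ (n.toNat : Int) := by rwa [Int.toNat_of_nonneg hn]
      have : ((2 ^ k : Nat) : Int) ≤ (n.toNat : Int) := by push_cast; exact this
      exact absurd (Int.ofNat_le.mp this) (Nat.not_le.mpr hlt)
    rw [sum1Loop]
    simp only [hnot, false_and, dite_false]
    have : max (Nat.size n.toNat) k = k := Nat.max_eq_right hk
    rw [this]; ring
  | succ d ih =>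
    intro k s hk
    by_cases h : (2 : Int) ^ k ≤ n
    · have hpos : (1 : Int) ≤ (2 : Int) ^ k := one_le_pow₀ (by norm_num)
      rw [sum1Loop]
      simp only [h, hpos, and_true, dite_true]
      have hk2 : (2 : Int) ^ k * 2 = (2 : Int) ^ (k + 1) := by rw [pow_succ]
      have hksz : k < Nat.size n.toNat := by
        rw [Nat.lt_size]
        have : ((2 ^ k : Nat) : Int) ≤ (n.toNat : Int) := by
          push_cast
          rwa [Int.toNat_of_nonneg hn]
        exact Int.ofNat_le.mp this
      have hrec := ih (k + 1) (s + 2 ^ k) (by omega)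
      rw [hk2, hrec]
      have h1 : max (Nat.size n.toNat) (k + 1) = Nat.size n.toNat := Nat.max_eq_left hksz
      have h2 : max (Nat.size n.toNat) k = Nat.size n.toNat := Nat.max_eq_left (le_of_lt hksz)
      rw [h1, h2, pow_succ]; ring
    · rw [sum1Loop]
      simp only [h, false_and, dite_false]
      have hlt : n < (2 : Int) ^ k := not_le.mp h
      have hszk : Nat.size n.toNat ≤ k := by
        rw [Nat.size_le]
        have : (n.toNat : Int) < ((2 ^ k : Nat) : Int) := by
          push_cast
          calc (n.toNat : Int) = n := Int.toNat_of_nonneg hn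
          _ < 2 ^ k := hlt
        exact_mod_cast this
      rw [Nat.max_eq_right hszk]; ring

lemma sum1Loop_closed (n : Int) :
    sum1Loop n 1 0 = if 0 < n then (1 <<< (Nat.size n.toNat) : Int) - 1 else 0 := by
  by_cases hn : 0 < n
  · have := sum1Loop_pow n (le_of_lt hn) (Nat.size n.toNat) 0 0 (by omega)
    simp only [pow_zero, Nat.max_zero, zero_add] at this
    rw [this, if_pos hn]
    rw [Nat.shiftLeft_eq]
    push_cast
    ring
  · rw [sum1Loop]
    have : ¬ ((1 : Int) ≤ n ∧ (1:Int) ≤ 1) := by omega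
    simp only [this, dite_false, if_neg hn]

-- ===== VERDICT (by name: the statement is the Claim_ definition above) =====
theorem sum1_spec : Claim_equal_sum1 := by
  intro n _
  unfold Spec_sum1 sum1 sum1_alt
  rw [sum1Loop_closed]
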